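-- pv_equiv track=rewrite | github.com/pypi-data/pypi-mirror-390 | packages/hcom/hcom-0.6.2.tar.gz/hcom-0.6.2/src/hcom/core/messages.py | unescape_bash
-- ===== SOURCE A (Python) =====
-- def unescape_bash(text: str) -> str:
--     """Remove bash escape sequences from message content.
--
--     Bash escapes special characters when constructing commands. Since hcom
--     receives messages as command arguments, we unescape common sequences
--     that don't affect the actual message intent.
--     """
--     # Common bash escapes that appear in double-quoted strings
--     replacements = [
--         ('\\!', '!'),   # History expansion
--         ('\\$', '$'),   # Variable expansion
--         ('\\`', '`'),   # Command substitution
--         ('\\"', '"'),   # Double quote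
--         ("\\'", "'"),   # Single quote (less common in double quotes but possible)
--     ]
--     for escaped, unescaped in replacements:
--         text = text.replace(escaped, unescaped)
--     return text
-- ===== SOURCE B (Python) =====
-- def unescape_bash(text: str) -> str:
--     """Remove bash escape sequences from message content (single pass)."""
--     specials = "!$`\"'"
--     out = []
--     i = 0
--     n = len(text)
--     while i < n:
--         if text[i] == '\\' and i + 1 < n and text[i + 1] in specials:
--             out.append(text[i + 1])
--             i += 2
--         else:
--             out.append(text[i])
--             i += 1
--     return ''.join(out)
-- ===== Notes on version B (the rewrite author's own statement) =====
-- stated objective: alternative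
-- what changed: Replaces five sequential str.replace scans (each building an intermediate string) with one left-to-right indexed pass that copies each char, dropping a backslash exactly when it precedes one of the five special characters.
import Mathlib
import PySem

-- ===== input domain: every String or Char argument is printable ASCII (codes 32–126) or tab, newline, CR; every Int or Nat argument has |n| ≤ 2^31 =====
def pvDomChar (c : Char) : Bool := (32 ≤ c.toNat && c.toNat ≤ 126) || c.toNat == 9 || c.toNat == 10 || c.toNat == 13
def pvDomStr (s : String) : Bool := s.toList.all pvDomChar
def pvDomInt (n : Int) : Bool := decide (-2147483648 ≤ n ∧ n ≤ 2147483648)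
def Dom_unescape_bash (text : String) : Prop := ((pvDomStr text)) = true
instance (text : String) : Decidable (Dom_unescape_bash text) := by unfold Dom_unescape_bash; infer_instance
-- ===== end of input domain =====

-- B replaces A's five sequential str.replace scans with one left-to-right pass over the characters.

-- ===== PORT A =====
-- literal port: the list of replacement pairs, applied in order with Python's str.replace
def unescape_bash (text : String) : String :=
  let replacements : List (String × String) :=
    [("\\!", "!"), ("\\$", "$"), ("\\`", "`"), ("\\\"", "\""), ("\\'", "'")]
  replacements.foldl (fun t p => PySem.Str.replace t p.1 p.2) text

-- ===== PORT B =====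
-- the set of special characters Source B keeps in `specials`
def pvSpecials : List Char := ['!', '$', '`', '"', '\'']

-- the while-loop of Source B: `out` is the accumulator list, the remaining suffix is the list argument
def unescGo : List Char → List Char → List Char
  | out, a :: b :: rest =>
      if a = '\\' ∧ b ∈ pvSpecials then unescGo (out ++ [b]) rest
      else unescGo (out ++ [a]) (b :: rest)
  | out, l => out ++ l

def unescape_bash_alt (text : String) : String :=
  String.ofList (unescGo [] text.toList)

-- ===== PRECONDITION & SPEC =====
def Spec_unescape_bash (text : String) (out : String) : Prop := out = unescape_bash_alt text
instance (text : String) (out : String) : Decidable (Spec_unescape_bash text out) := by unfold Spec_unescape_bash; infer_instance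

-- ===== CLAIM (what is proved, stated in full; the proofs are below) =====
def Claim_equal_unescape_bash : Prop := ∀ (text : String), Dom_unescape_bash text → Spec_unescape_bash text (unescape_bash text)

-- ===== LEMMAS AND PROOFS =====

-- one str.replace pass for the two-char pattern ['\\', c] → [c], written as plain recursion
def rep1 (c : Char) : List Char → List Char
  | a :: b :: rest =>
      if a = '\\' ∧ b = c then c :: rep1 c rest
      else a :: rep1 c (b :: rest)
  | l => l

-- Source B's single pass, without the accumulator
def unescU : List Char → List Char
  | a :: b :: rest =>
      if a = '\\' ∧ b ∈ pvSpecials then b :: unescU rest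
      else a :: unescU (b :: rest)
  | l => l

theorem replace_go_eq (c : Char) :
    ∀ (fuel : Nat) (l acc : List Char), l.length ≤ fuel →
      PySem.Chars.replace.go ['\\', c] [c] fuel l acc = acc.reverse ++ rep1 c l := by
  intro fuel
  induction fuel with
  | zero =>
      intro l acc h
      have : l = [] := List.eq_nil_of_length_eq_zero (Nat.le_zero.mp h)
      subst this
      simp [PySem.Chars.replace.go, rep1]
  | succ f ih =>
      intro l acc h
      match l with
      | [] => simp [PySem.Chars.replace.go, rep1]
      | [a] =>
          have hpre : List.isPrefixOf ['\\', c] [a] = false := by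
            simp [List.isPrefixOf]
          simp only [PySem.Chars.replace.go, hpre, Bool.false_eq_true, if_false]
          rw [ih [] (a :: acc) (by simp)]
          simp [rep1]
      | a :: b :: rest =>
          by_cases hm : a = '\\' ∧ b = c
          · obtain ⟨ha, hb⟩ := hm
            subst ha; subst hb
            have hpre : List.isPrefixOf ['\\', b] ('\\' :: b :: rest) = true := by
              simp [List.isPrefixOf]
            simp only [PySem.Chars.replace.go, hpre, if_true]
            rw [show List.drop ['\\', b].length ('\\' :: b :: rest) = rest by simp]
            rw [ih rest ([b].reverse ++ acc) (by simp at h ⊢; omega)]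
            simp [rep1]
          · have hpre : List.isPrefixOf ['\\', c] (a :: b :: rest) = false := by
              simp [List.isPrefixOf]
              intro ha hb
              exact hm ⟨ha.symm, hb.symm⟩
            simp only [PySem.Chars.replace.go, hpre, Bool.false_eq_true, if_false]
            rw [ih (b :: rest) (a :: acc) (by simp at h ⊢; omega)]
            simp [rep1, hm]

theorem replace_eq_rep1 (c : Char) (l : List Char) :
    PySem.Chars.replace l ['\\', c] [c] = rep1 c l := by
  rw [PySem.Chars.replace]
  simp only [List.isEmpty_cons, if_false, Bool.false_eq_true]
  rw [replace_go_eq c l.length l [] (le_refl _)]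
  simp

-- rep1 passes a non-backslash head through
theorem rep1_cons (c b : Char) (hb : b ≠ '\\') (x : List Char) :
    rep1 c (b :: x) = b :: rep1 c x := by
  match x with
  | [] => rfl
  | d :: t => simp [rep1, hb]

-- rep1 passes a backslash through when the next char is not c
theorem rep1_bs (c : Char) (x : List Char) (hx : x.head? ≠ some c) :
    rep1 c ('\\' :: x) = '\\' :: rep1 c x := by
  match x with
  | [] => rfl
  | d :: t =>
      have hd : d ≠ c := by simpa using hx
      simp [rep1, hd]

-- the head of rep1's result is the original head or c
theorem rep1_head (c : Char) (y : List Char) :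
    (rep1 c y).head? = y.head? ∨ (rep1 c y).head? = some c := by
  match y with
  | [] => left; rfl
  | [a] => left; rfl
  | a :: b :: rest =>
      by_cases hm : a = '\\' ∧ b = c
      · right; simp [rep1, hm]
      · left; simp [rep1, hm]

-- A's five passes, composed in A's order
def repAll (l : List Char) : List Char :=
  rep1 '\'' (rep1 '"' (rep1 '`' (rep1 '$' (rep1 '!' l))))

theorem repAll_cons (b : Char) (hb : b ≠ '\\') (x : List Char) :
    repAll (b :: x) = b :: repAll x := by
  unfold repAll
  rw [rep1_cons _ _ hb, rep1_cons _ _ hb, rep1_cons _ _ hb, rep1_cons _ _ hb,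
      rep1_cons _ _ hb]

-- the chain passes a backslash through when the char after it is a backslash or not special
theorem repAll_bs (x : List Char) (h : Char) (hx : x.head? = some h)
    (hh : h = '\\' ∨ h ∉ pvSpecials) : repAll ('\\' :: x) = '\\' :: repAll x := by
  have hsp : h ≠ '!' ∧ h ≠ '$' ∧ h ≠ '`' ∧ h ≠ '"' ∧ h ≠ '\'' := by
    rcases hh with hh | hh
    · subst hh; refine ⟨by decide, by decide, by decide, by decide, by decide⟩
    · simp [pvSpecials] at hh
      exact ⟨hh.1, hh.2.1, hh.2.2.1, hh.2.2.2.1, hh.2.2.2.2⟩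
  obtain ⟨h1, h2, h3, h4, h5⟩ := hsp
  unfold repAll
  rw [rep1_bs '!' x (by rw [hx]; simp [h1])]
  have e1 := rep1_head '!' x
  rw [rep1_bs '$' _ (by rcases e1 with e | e <;> rw [e] <;> simp [hx, h2])]
  have e2 := rep1_head '$' (rep1 '!' x)
  rw [rep1_bs '`' _ (by rcases e2 with e | e <;> rw [e] <;>
        [skip; simp] <;> rcases e1 with e' | e' <;> rw [e'] <;> simp [hx, h3])]
  have e3 := rep1_head '`' (rep1 '$' (rep1 '!' x))
  rw [rep1_bs '"' _ (by
        rcases e3 with e | e <;> rw [e] <;> [skip; simp]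
        rcases e2 with e' | e' <;> rw [e'] <;> [skip; simp]
        rcases e1 with e'' | e'' <;> rw [e''] <;> simp [hx, h4])]
  have e4 := rep1_head '"' (rep1 '`' (rep1 '$' (rep1 '!' x)))
  rw [rep1_bs '\'' _ (by
        rcases e4 with e | e <;> rw [e] <;> [skip; simp]
        rcases e3 with e' | e' <;> rw [e'] <;> [skip; simp]
        rcases e2 with e'' | e'' <;> rw [e''] <;> [skip; simp]
        rcases e1 with e''' | e''' <;> rw [e'''] <;> simp [hx, h5])]

-- the heart: A's five sequential passes equal B's single pass
theorem repAll_eq_unescU (l : List Char) : repAll l = unescU l := by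
  induction l using unescU.induct with
  | case1 a b rest hm ih =>
      -- a = '\\', b ∈ pvSpecials
      obtain ⟨ha, hb⟩ := hm
      subst ha
      fin_cases hb
      · -- b = '!'
        show repAll ('\\' :: '!' :: rest) = unescU ('\\' :: '!' :: rest)
        unfold repAll
        rw [show rep1 '!' ('\\' :: '!' :: rest) = '!' :: rep1 '!' rest by simp [rep1]]
        rw [rep1_cons '$' '!' (by decide), rep1_cons '`' '!' (by decide),
            rep1_cons '"' '!' (by decide), rep1_cons '\'' '!' (by decide)]
        rw [show unescU ('\\' :: '!' :: rest) = '!' :: unescU rest by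
              simp [unescU, pvSpecials]]
        rw [← ih]; rfl
      · -- b = '$'
        show repAll ('\\' :: '$' :: rest) = unescU ('\\' :: '$' :: rest)
        unfold repAll
        rw [show rep1 '!' ('\\' :: '$' :: rest) = '\\' :: '$' :: rep1 '!' rest by
              simp [rep1]; rw [rep1_cons '!' '$' (by decide)]]
        rw [show rep1 '$' ('\\' :: '$' :: rep1 '!' rest)
              = '$' :: rep1 '$' (rep1 '!' rest) by simp [rep1]]
        rw [rep1_cons '`' '$' (by decide), rep1_cons '"' '$' (by decide),
            rep1_cons '\'' '$' (by decide)]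
        rw [show unescU ('\\' :: '$' :: rest) = '$' :: unescU rest by
              simp [unescU, pvSpecials]]
        rw [← ih]; rfl
      · -- b = '`'
        show repAll ('\\' :: '`' :: rest) = unescU ('\\' :: '`' :: rest)
        unfold repAll
        rw [show rep1 '!' ('\\' :: '`' :: rest) = '\\' :: '`' :: rep1 '!' rest by
              simp [rep1]; rw [rep1_cons '!' '`' (by decide)]]
        rw [show rep1 '$' ('\\' :: '`' :: rep1 '!' rest)
              = '\\' :: '`' :: rep1 '$' (rep1 '!' rest) by
              simp [rep1]; rw [rep1_cons '$' '`' (by decide)]]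
        rw [show rep1 '`' ('\\' :: '`' :: rep1 '$' (rep1 '!' rest))
              = '`' :: rep1 '`' (rep1 '$' (rep1 '!' rest)) by simp [rep1]]
        rw [rep1_cons '"' '`' (by decide), rep1_cons '\'' '`' (by decide)]
        rw [show unescU ('\\' :: '`' :: rest) = '`' :: unescU rest by
              simp [unescU, pvSpecials]]
        rw [← ih]; rfl
      · -- b = '"'
        show repAll ('\\' :: '"' :: rest) = unescU ('\\' :: '"' :: rest)
        unfold repAll
        rw [show rep1 '!' ('\\' :: '"' :: rest) = '\\' :: '"' :: rep1 '!' rest by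
              simp [rep1]; rw [rep1_cons '!' '"' (by decide)]]
        rw [show rep1 '$' ('\\' :: '"' :: rep1 '!' rest)
              = '\\' :: '"' :: rep1 '$' (rep1 '!' rest) by
              simp [rep1]; rw [rep1_cons '$' '"' (by decide)]]
        rw [show rep1 '`' ('\\' :: '"' :: rep1 '$' (rep1 '!' rest))
              = '\\' :: '"' :: rep1 '`' (rep1 '$' (rep1 '!' rest)) by
              simp [rep1]; rw [rep1_cons '`' '"' (by decide)]]
        rw [show rep1 '"' ('\\' :: '"' :: rep1 '`' (rep1 '$' (rep1 '!' rest)))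
              = '"' :: rep1 '"' (rep1 '`' (rep1 '$' (rep1 '!' rest))) by simp [rep1]]
        rw [rep1_cons '\'' '"' (by decide)]
        rw [show unescU ('\\' :: '"' :: rest) = '"' :: unescU rest by
              simp [unescU, pvSpecials]]
        rw [← ih]; rfl
      · -- b = '\''
        show repAll ('\\' :: '\'' :: rest) = unescU ('\\' :: '\'' :: rest)
        unfold repAll
        rw [show rep1 '!' ('\\' :: '\'' :: rest) = '\\' :: '\'' :: rep1 '!' rest by
              simp [rep1]; rw [rep1_cons '!' '\'' (by decide)]]
        rw [show rep1 '$' ('\\' :: '\'' :: rep1 '!' rest)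
              = '\\' :: '\'' :: rep1 '$' (rep1 '!' rest) by
              simp [rep1]; rw [rep1_cons '$' '\'' (by decide)]]
        rw [show rep1 '`' ('\\' :: '\'' :: rep1 '$' (rep1 '!' rest))
              = '\\' :: '\'' :: rep1 '`' (rep1 '$' (rep1 '!' rest)) by
              simp [rep1]; rw [rep1_cons '`' '\'' (by decide)]]
        rw [show rep1 '"' ('\\' :: '\'' :: rep1 '`' (rep1 '$' (rep1 '!' rest)))
              = '\\' :: '\'' :: rep1 '"' (rep1 '`' (rep1 '$' (rep1 '!' rest))) by
              simp [rep1]; rw [rep1_cons '"' '\'' (by decide)]]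
        rw [show rep1 '\'' ('\\' :: '\'' :: rep1 '"' (rep1 '`' (rep1 '$' (rep1 '!' rest))))
              = '\'' :: rep1 '\'' (rep1 '"' (rep1 '`' (rep1 '$' (rep1 '!' rest)))) by
              simp [rep1]]
        rw [show unescU ('\\' :: '\'' :: rest) = '\'' :: unescU rest by
              simp [unescU, pvSpecials]]
        rw [← ih]; rfl
  | case2 a b rest hm ih =>
      by_cases ha : a = '\\'
      · subst ha
        have hb : b = '\\' ∨ b ∉ pvSpecials := by
          by_cases hbb : b = '\\'
          · exact Or.inl hbb
          · right; intro hmem; exact hm ⟨rfl, hmem⟩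
        rw [repAll_bs (b :: rest) b rfl hb]
        rw [show unescU ('\\' :: b :: rest) = '\\' :: unescU (b :: rest) by
              rw [unescU, if_neg hm]]
        rw [ih]
      · rw [repAll_cons a ha]
        rw [show unescU (a :: b :: rest) = a :: unescU (b :: rest) by
              rw [unescU, if_neg hm]]
        rw [ih]
  | case3 l h =>
      cases l with
      | nil => rfl
      | cons a t =>
        cases t with
        | nil => rfl
        | cons b r => exact (h a b r rfl).elim

-- the accumulator form of B's loop
theorem unescGo_eq (out l : List Char) : unescGo out l = out ++ unescU l := by
  induction l using unescU.induct generalizing out with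
  | case1 a b rest hm ih =>
      rw [unescGo, unescU]
      simp only [hm]
      rw [ih]; simp
  | case2 a b rest hm ih =>
      rw [unescGo, unescU]
      simp only [hm, if_false]
      rw [ih]; simp
  | case3 l h =>
      cases l with
      | nil => simp [unescGo, unescU]
      | cons a t =>
        cases t with
        | nil => simp [unescGo, unescU]
        | cons b r => exact (h a b r rfl).elim

-- A's port, computed on the character list
theorem unescape_bash_toList (text : String) :
    (unescape_bash text).toList = repAll text.toList := by
  unfold unescape_bash repAll
  simp only [List.foldl]
  rw [PySem.Str.toList_replace, PySem.Str.toList_replace, PySem.Str.toList_replace,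
      PySem.Str.toList_replace, PySem.Str.toList_replace]
  rw [show ("\\!" : String).toList = ['\\', '!'] from by decide,
      show ("!" : String).toList = ['!'] from by decide,
      show ("\\$" : String).toList = ['\\', '$'] from by decide,
      show ("$" : String).toList = ['$'] from by decide,
      show ("\\`" : String).toList = ['\\', '`'] from by decide,
      show ("`" : String).toList = ['`'] from by decide,
      show ("\\\"" : String).toList = ['\\', '"'] from by decide,
      show ("\"" : String).toList = ['"'] from by decide,
      show ("\\'" : String).toList = ['\\', '\''] from by decide,
      show ("'" : String).toList = ['\''] from by decide]
  rw [replace_eq_rep1, replace_eq_rep1, replace_eq_rep1, replace_eq_rep1, replace_eq_rep1]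

-- ===== VERDICT (by name: the statement is the Claim_ definition above) =====
theorem unescape_bash_spec : Claim_equal_unescape_bash := by
  intro text _
  unfold Spec_unescape_bash unescape_bash_alt
  rw [unescGo_eq, List.nil_append, ← repAll_eq_unescU]
  apply String.toList_inj.mp
  rw [unescape_bash_toList]
  simp
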